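-- pv_equiv track=rewrite | github.com/josh-spratt/advent-of-code-2024 | solutions/day04/part_01.py | get_next_characters
-- ===== SOURCE A (Python) =====
-- def get_next_characters(matrix):
--     rows, cols = len(matrix), len(matrix[0])
--     directions = [
--         (0, 1),  # right
--         (0, -1),  # left
--         (1, 0),  # down
--         (-1, 0),  # up
--         (1, 1),  # diagonal down-right
--         (-1, -1),  # diagonal up-left
--         (1, -1),  # diagonal down-left
--         (-1, 1),  # diagonal up-right
--     ]
--
--     def get_next_chars_in_direction(x, y, dx, dy):
--         """Get next three characters in the given direction (dx, dy), checking bounds"""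
--         chars = []
--         for i in range(1, 4):  # Only next 3 characters
--             nx, ny = x + i * dx, y + i * dy
--             if 0 <= nx < rows and 0 <= ny < cols:
--                 chars.append(matrix[nx][ny])
--             else:
--                 chars.append(None)  # If out of bounds, append None
--         return chars
--
--     result = {}
--     for r in range(rows):
--         for c in range(cols):
--             if matrix[r][c] == "X":
--                 result[(r, c)] = {}
--
--                 # For each direction, collect the next 3 characters
--                 for dx, dy in directions:
--                     direction_name = f"direction_{dx}_{dy}"
--                     result[(r, c)][direction_name] = get_next_chars_in_direction(
--                         r, c, dx, dy
--                     )
--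
--     return result
-- ===== SOURCE B (Python) =====
-- def get_next_characters(matrix):
--     rows, cols = len(matrix), len(matrix[0])
--     directions = [
--         (0, 1), (0, -1), (1, 0), (-1, 0),
--         (1, 1), (-1, -1), (1, -1), (-1, 1),
--     ]
--     # Pad the grid with a 3-cell border of None so direction reads need no bounds check.
--     blank = [None] * (cols + 6)
--     padded = [blank] * 3 + [[None] * 3 + row[:cols] + [None] * 3 for row in matrix] + [blank] * 3
--     return {
--         (r, c): {
--             f"direction_{dx}_{dy}": [padded[r + 3 + i * dx][c + 3 + i * dy] for i in (1, 2, 3)]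
--             for dx, dy in directions
--         }
--         for r in range(rows)
--         for c in range(cols)
--         if matrix[r][c] == "X"
--     }
-- ===== Notes on version B (the rewrite author's own statement) =====
-- stated objective: simpler
-- what changed: B pads the grid with a 3-cell border of None and reads the three cells per direction directly with no bounds check, building the result as a single comprehension instead of A's per-cell helper loop with explicit bounds tests and nested dict mutation.
import Mathlib
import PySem

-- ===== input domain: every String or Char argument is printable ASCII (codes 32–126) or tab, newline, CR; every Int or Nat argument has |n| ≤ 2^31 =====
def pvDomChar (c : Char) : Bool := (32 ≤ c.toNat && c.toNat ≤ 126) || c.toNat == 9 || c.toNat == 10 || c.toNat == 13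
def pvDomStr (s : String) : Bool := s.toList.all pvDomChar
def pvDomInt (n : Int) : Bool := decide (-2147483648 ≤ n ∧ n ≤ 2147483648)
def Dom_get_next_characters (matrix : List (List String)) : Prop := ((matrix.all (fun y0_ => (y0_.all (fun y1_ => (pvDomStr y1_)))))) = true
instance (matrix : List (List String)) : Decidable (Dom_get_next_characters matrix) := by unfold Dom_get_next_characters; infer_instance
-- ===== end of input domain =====

-- B pads the grid with a 3-cell None border and reads directions without bounds checks,
-- building the result as one comprehension: simpler, same cost.


-- ===== PORT A =====
-- A's directions list
def gncDirections : List (Int × Int) :=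
  [(0, 1), (0, -1), (1, 0), (-1, 0), (1, 1), (-1, -1), (1, -1), (-1, 1)]

-- A's helper get_next_chars_in_direction; 'matrix[nx][ny]' is ported with pyGet? (the guard keeps
-- both indices in 0-based range; on the rectangular inputs of Pre_ the row access never fails)
def get_next_chars_in_direction (matrix : List (List String)) (rows cols x y dx dy : Int) :
    List (Option String) :=
  (PySem.List.pyRange 1 4 1).foldl (fun chars i =>
    let nx := x + i * dx
    let ny := y + i * dy
    if 0 ≤ nx ∧ nx < rows ∧ 0 ≤ ny ∧ ny < cols then
      chars ++ [PySem.List.pyGet? ((PySem.List.pyGet? matrix nx).getD []) ny]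
    else
      chars ++ [none]) []

-- A's main double scan; 'result[(r,c)] = {}' followed by the direction inserts appends one
-- (key, inner dict) pair per 'X' cell, keys fresh in scan order, so the dict is this list
def get_next_characters (matrix : List (List String)) :
    List (Int × Int × List (String × List (Option String))) :=
  let rows : Int := matrix.length
  let cols : Int := ((PySem.List.pyGet? matrix 0).getD []).length
  (PySem.List.pyRange 0 rows 1).foldl (fun result r =>
    (PySem.List.pyRange 0 cols 1).foldl (fun result c =>
      if PySem.List.pyGet? ((PySem.List.pyGet? matrix r).getD []) c = some "X" then
        result ++ [(r, c,
          gncDirections.foldl (fun inner d =>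
            inner ++ [("direction_" ++ PySem.Int.toStr d.1 ++ "_" ++ PySem.Int.toStr d.2,
              get_next_chars_in_direction matrix rows cols r c d.1 d.2)]) [])]
      else result) result) []

-- ===== PORT B =====
-- B's directions list is the same literal as A's; the shared constant gncDirections is reused

-- '[None]*3 + row[:cols] + [None]*3' (strings become 'some', the border is 'none')
def gncPadRow (cols : Int) (row : List String) : List (Option String) :=
  List.replicate 3 none ++ (PySem.List.slice row (some 0) (some cols)).map some ++ List.replicate 3 none

-- '[None] * (cols + 6)'
def gncBlank (cols : Int) : List (Option String) :=
  List.replicate (cols + 6).toNat none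

-- '[blank]*3 + [padded rows] + [blank]*3'
def gncPadded (matrix : List (List String)) (cols : Int) : List (List (Option String)) :=
  List.replicate 3 (gncBlank cols) ++ matrix.map (gncPadRow cols) ++ List.replicate 3 (gncBlank cols)

-- 'padded[i][j]': both indices are nonnegative and in range by construction, so the
-- getD defaults are never taken on B's own reads
def gncRead (padded : List (List (Option String))) (i j : Int) : Option String :=
  (PySem.List.pyGet? ((PySem.List.pyGet? padded i).getD []) j).getD none

def get_next_characters_alt (matrix : List (List String)) :
    List (Int × Int × List (String × List (Option String))) :=
  let rows : Int := matrix.length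
  let cols : Int := ((PySem.List.pyGet? matrix 0).getD []).length
  let padded := gncPadded matrix cols
  (PySem.List.pyRange 0 rows 1).flatMap (fun r =>
    (PySem.List.pyRange 0 cols 1).filterMap (fun c =>
      if PySem.List.pyGet? ((PySem.List.pyGet? matrix r).getD []) c = some "X" then
        some (r, c,
          gncDirections.map (fun d =>
            ("direction_" ++ PySem.Int.toStr d.1 ++ "_" ++ PySem.Int.toStr d.2,
              ([1, 2, 3] : List Int).map (fun i =>
                gncRead padded (r + 3 + i * d.1) (c + 3 + i * d.2)))))
      else none))

-- ===== PRECONDITION & SPEC =====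
-- Pre_ excludes exactly the inputs where the Python A raises IndexError: the empty matrix
-- ('matrix[0]') and ragged matrices having some row shorter than the first row (the scan
-- reads 'matrix[r][c]' for every c < len(matrix[0])); B raises on exactly the same inputs.
def Pre_get_next_characters (matrix : List (List String)) : Prop :=
  matrix ≠ [] ∧ ∀ row ∈ matrix, (matrix.headD []).length ≤ row.length
instance (matrix : List (List String)) : Decidable (Pre_get_next_characters matrix) := by
  unfold Pre_get_next_characters; infer_instance

def pvWitness_get_next_characters : List (List String) := [["X", "M"], ["A", "S"]]

def Spec_get_next_characters (matrix : List (List String)) (out : List (Int × Int × List (String × List (Option String)))) : Prop := out = get_next_characters_alt matrix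
instance (matrix : List (List String)) (out : List (Int × Int × List (String × List (Option String)))) : Decidable (Spec_get_next_characters matrix out) := by unfold Spec_get_next_characters; infer_instance

-- ===== CLAIM (what is proved, stated in full; the proofs are below) =====
def Claim_equal_get_next_characters : Prop := ∀ (matrix : List (List String)), Dom_get_next_characters matrix → Pre_get_next_characters matrix → Spec_get_next_characters matrix (get_next_characters matrix)

-- ===== LEMMAS AND PROOFS =====

-- A 'for x: if p x: acc.append(f x)' loop is the filterMap of its body
theorem gnc_foldl_if_filterMap {α β : Type} (p : α → Prop) [DecidablePred p] (f : α → β)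
    (l : List α) (acc : List β) :
    l.foldl (fun acc x => if p x then acc ++ [f x] else acc) acc
      = acc ++ l.filterMap (fun x => if p x then some (f x) else none) := by
  induction l generalizing acc with
  | nil => simp
  | cons a t ih => by_cases h : p a <;> simp [h, ih]

-- reading B's padded border row gives None
theorem gncBlank_read (cols : Nat) (ny : Int) (hy : -3 ≤ ny) :
    (PySem.List.pyGet? (gncBlank (cols : Int)) (ny + 3)).getD none = none := by
  unfold gncBlank
  rw [show ((cols : Int) + 6).toNat = cols + 6 by omega,
      show ny + 3 = (((ny + 3).toNat : Nat) : Int) by omega,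
      PySem.List.pyGet?_natCast]
  rw [List.getElem?_replicate]
  split <;> simp

-- reading B's padded copy of a row reproduces A's bounds-checked read of the row
theorem gncPadRow_read (row : List String) (cols : Nat) (ny : Int) (hy : -3 ≤ ny) :
    (PySem.List.pyGet? (gncPadRow (cols : Int) row) (ny + 3)).getD none
      = if 0 ≤ ny ∧ ny < (cols : Int) then PySem.List.pyGet? row ny else none := by
  have hslice : PySem.List.slice row (some (0 : Int)) (some ((cols : Nat) : Int))
      = List.take cols row := by
    simp [PySem.List.slice_natCast row 0 cols]
  unfold gncPadRow
  rw [hslice, List.append_assoc]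
  rw [show ny + 3 = (((ny + 3).toNat : Nat) : Int) by omega, PySem.List.pyGet?_natCast]
  set j := (ny + 3).toNat with hj
  have hml : (List.map (some : String → Option String) (List.take cols row)).length
      = min cols row.length := by simp
  by_cases h1 : j < 3
  · rw [List.getElem?_append_left (by simpa using h1), List.getElem?_replicate, if_pos h1]
    have hng : ¬ (0 ≤ ny ∧ ny < (cols : Int)) := by omega
    simp [hng]
  · have hny : 0 ≤ ny := by omega
    rw [List.getElem?_append_right (by simpa using Nat.le_of_not_lt h1)]
    simp only [List.length_replicate]
    rw [show j - 3 = ny.toNat by omega]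
    by_cases h2 : ny.toNat < (List.map (some : String → Option String) (List.take cols row)).length
    · have h2c : ny.toNat < cols := by omega
      have h2r : ny.toNat < row.length := by omega
      rw [List.getElem?_append_left h2, List.getElem?_map, List.getElem?_take, if_pos h2c,
          List.getElem?_eq_getElem h2r]
      rw [if_pos (⟨hny, by omega⟩ : 0 ≤ ny ∧ ny < (cols : Int))]
      have hrg : PySem.List.pyGet? row ny = some row[ny.toNat] := by
        conv_lhs => rw [show ny = ((ny.toNat : Nat) : Int) by omega]
        rw [PySem.List.pyGet?_natCast]
        exact List.getElem?_eq_getElem h2r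
      rw [hrg]
      simp
    · rw [List.getElem?_append_right (Nat.le_of_not_lt h2)]
      rw [List.getElem?_replicate]
      by_cases hin : 0 ≤ ny ∧ ny < (cols : Int)
      · have hcny : ny.toNat < cols := by
          have := hin.2; omega
        have hrl : row.length ≤ ny.toNat := by omega
        rw [if_pos hin, show ny = ((ny.toNat : Nat) : Int) by omega, PySem.List.pyGet?_natCast,
            List.getElem?_eq_none hrl]
        split <;> simp
      · rw [if_neg hin]
        split <;> simp

-- reading any cell of B's padded grid equals A's fully bounds-checked read of the grid
theorem gncRead_eq (matrix : List (List String)) (cols : Nat) (nx ny : Int)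
    (hx : -3 ≤ nx) (hy : -3 ≤ ny) :
    gncRead (gncPadded matrix (cols : Int)) (nx + 3) (ny + 3)
      = if 0 ≤ nx ∧ nx < (matrix.length : Int) ∧ 0 ≤ ny ∧ ny < (cols : Int)
        then PySem.List.pyGet? ((PySem.List.pyGet? matrix nx).getD []) ny
        else none := by
  unfold gncRead gncPadded
  rw [List.append_assoc]
  rw [show nx + 3 = (((nx + 3).toNat : Nat) : Int) by omega, PySem.List.pyGet?_natCast]
  set k := (nx + 3).toNat with hk
  by_cases h1 : k < 3
  · rw [List.getElem?_append_left (by simpa using h1), List.getElem?_replicate, if_pos h1]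
    have hng : ¬ (0 ≤ nx ∧ nx < (matrix.length : Int) ∧ 0 ≤ ny ∧ ny < (cols : Int)) := by
      omega
    rw [if_neg hng]
    simp only [Option.getD_some]
    exact gncBlank_read cols ny hy
  · have hnx0 : 0 ≤ nx := by omega
    rw [List.getElem?_append_right (by simpa using Nat.le_of_not_lt h1)]
    simp only [List.length_replicate]
    rw [show k - 3 = nx.toNat by omega]
    by_cases h2 : nx.toNat < matrix.length
    · have hlt : nx < (matrix.length : Int) := by omega
      rw [List.getElem?_append_left (by simpa using h2), List.getElem?_map,
          List.getElem?_eq_getElem h2]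
      simp only [Option.map_some, Option.getD_some]
      rw [gncPadRow_read _ cols ny hy]
      by_cases hin : 0 ≤ ny ∧ ny < (cols : Int)
      · rw [if_pos hin, if_pos ⟨hnx0, hlt, hin.1, hin.2⟩]
        have hmg : PySem.List.pyGet? matrix nx = some matrix[nx.toNat] := by
          conv_lhs => rw [show nx = ((nx.toNat : Nat) : Int) by omega]
          rw [PySem.List.pyGet?_natCast]
          exact List.getElem?_eq_getElem h2
        rw [hmg, Option.getD_some]
      · rw [if_neg hin, if_neg (fun h => hin ⟨h.2.2.1, h.2.2.2⟩)]
    · rw [List.getElem?_append_right (by simpa using Nat.le_of_not_lt h2)]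
      simp only [List.length_map]
      rw [List.getElem?_replicate,
          if_neg (show ¬ (0 ≤ nx ∧ nx < (matrix.length : Int) ∧ 0 ≤ ny ∧ ny < (cols : Int))
            by omega)]
      split
      · simp only [Option.getD_some]
        exact gncBlank_read cols ny hy
      · simp only [Option.getD_none]
        rw [show ny + 3 = (((ny + 3).toNat : Nat) : Int) by omega, PySem.List.pyGet?_natCast]
        simp

-- A's helper equals B's three direct reads from the padded grid
theorem gncDir_eq (matrix : List (List String)) (cols : Nat) (r c dx dy : Int)
    (hr : 0 ≤ r) (hc : 0 ≤ c) (hdx : -1 ≤ dx) (hdy : -1 ≤ dy) :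
    get_next_chars_in_direction matrix (matrix.length : Int) (cols : Int) r c dx dy
      = ([1, 2, 3] : List Int).map (fun i =>
          gncRead (gncPadded matrix (cols : Int)) (r + 3 + i * dx) (c + 3 + i * dy)) := by
  unfold get_next_chars_in_direction
  rw [show PySem.List.pyRange 1 4 1 = [1, 2, 3] by decide]
  simp only [List.foldl, List.map, List.nil_append]
  rw [show r + 3 + 1 * dx = (r + 1 * dx) + 3 by ring,
      show c + 3 + 1 * dy = (c + 1 * dy) + 3 by ring,
      show r + 3 + 2 * dx = (r + 2 * dx) + 3 by ring,
      show c + 3 + 2 * dy = (c + 2 * dy) + 3 by ring,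
      show r + 3 + 3 * dx = (r + 3 * dx) + 3 by ring,
      show c + 3 + 3 * dy = (c + 3 * dy) + 3 by ring,
      gncRead_eq matrix cols _ _ (by omega) (by omega),
      gncRead_eq matrix cols _ _ (by omega) (by omega),
      gncRead_eq matrix cols _ _ (by omega) (by omega)]
  split_ifs <;> simp

-- whole per-cell entry: A's direction foldl equals B's direction map
theorem gncEntry_eq (matrix : List (List String)) (cols : Nat) (r c : Int)
    (hr : 0 ≤ r) (hc : 0 ≤ c) :
    gncDirections.foldl (fun inner d =>
      inner ++ [("direction_" ++ PySem.Int.toStr d.1 ++ "_" ++ PySem.Int.toStr d.2,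
        get_next_chars_in_direction matrix (matrix.length : Int) (cols : Int) r c d.1 d.2)]) []
      = gncDirections.map (fun d =>
          ("direction_" ++ PySem.Int.toStr d.1 ++ "_" ++ PySem.Int.toStr d.2,
            ([1, 2, 3] : List Int).map (fun i =>
              gncRead (gncPadded matrix (cols : Int)) (r + 3 + i * d.1) (c + 3 + i * d.2)))) := by
  rw [PySem.List.foldl_append_singleton_eq_map, List.nil_append]
  apply List.map_congr_left
  intro d hd
  have hb : -1 ≤ d.1 ∧ -1 ≤ d.2 := by fin_cases hd <;> exact ⟨by norm_num, by norm_num⟩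
  exact congrArg _ (gncDir_eq matrix cols r c d.1 d.2 hr hc hb.1 hb.2)

theorem gnc_eq (matrix : List (List String)) :
    get_next_characters matrix = get_next_characters_alt matrix := by
  unfold get_next_characters get_next_characters_alt
  simp only []
  rw [PySem.List.foldl_congr_mem (PySem.List.pyRange 0 (matrix.length : Int) 1) _
    (fun result r => result ++
      ((PySem.List.pyRange 0 (((PySem.List.pyGet? matrix 0).getD []).length : Int) 1).filterMap (fun c =>
        if PySem.List.pyGet? ((PySem.List.pyGet? matrix r).getD []) c = some "X" then
          some (r, c,
            gncDirections.map (fun d =>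
              ("direction_" ++ PySem.Int.toStr d.1 ++ "_" ++ PySem.Int.toStr d.2,
                ([1, 2, 3] : List Int).map (fun i =>
                  gncRead (gncPadded matrix (((PySem.List.pyGet? matrix 0).getD []).length : Int))
                    (r + 3 + i * d.1) (c + 3 + i * d.2)))))
        else none))) [] ?_]
  · rw [PySem.List.foldl_append_eq_flatMap]
    simp
  · intro acc r hr
    have hr0 : 0 ≤ r := ((PySem.List.mem_pyRange_one).mp hr).1
    rw [gnc_foldl_if_filterMap]
    congr 1
    apply List.filterMap_congr
    intro c hcmem
    have hc0 : 0 ≤ c := ((PySem.List.mem_pyRange_one).mp hcmem).1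
    by_cases hx : PySem.List.pyGet? ((PySem.List.pyGet? matrix r).getD []) c = some "X"
    · rw [if_pos hx, if_pos hx]
      exact congrArg some (congrArg _ (congrArg _
        (gncEntry_eq matrix (((PySem.List.pyGet? matrix 0).getD []).length) r c hr0 hc0)))
    · rw [if_neg hx, if_neg hx]

-- ===== VERDICT (by name: the statement is the Claim_ definition above) =====
theorem get_next_characters_spec : Claim_equal_get_next_characters := by
  intro matrix _ _
  unfold Spec_get_next_characters
  exact gnc_eq matrix
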